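-- pv_equiv track=rewrite | github.com/km16f/NaiveBayes.py | NaiveBayes.py | get_missing
-- ===== SOURCE A (Python) =====
-- def get_missing(line, largest_index):
--     attribute_list = []
--     zero_list = []
--     s = line.split(' ')
--     for entry in s[1:]:
--         sp = entry.split(':')
--         attribute_list.append(sp[0])
--     for i in range(1, largest_index + 1):
--         if str(i) not in attribute_list:
--             zero_list.append(str(i))
--     return zero_list
-- ===== SOURCE B (Python) =====
-- def get_missing(line, largest_index):
--     missing = dict.fromkeys(str(i) for i in range(1, largest_index + 1))
--     for entry in line.split(' ')[1:]:
--         missing.pop(entry.split(':')[0], None)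
--     return list(missing)
-- ===== Notes on version B (the rewrite author's own statement) =====
-- stated objective: alternative
-- what changed: B builds the whole index universe once as an insertion-ordered key table (dict.fromkeys) and bulk-deletes the keys present in the line (one pop per entry), returning the surviving keys; A instead scans the range and tests each index against a list of the line's attributes.
import Mathlib
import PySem

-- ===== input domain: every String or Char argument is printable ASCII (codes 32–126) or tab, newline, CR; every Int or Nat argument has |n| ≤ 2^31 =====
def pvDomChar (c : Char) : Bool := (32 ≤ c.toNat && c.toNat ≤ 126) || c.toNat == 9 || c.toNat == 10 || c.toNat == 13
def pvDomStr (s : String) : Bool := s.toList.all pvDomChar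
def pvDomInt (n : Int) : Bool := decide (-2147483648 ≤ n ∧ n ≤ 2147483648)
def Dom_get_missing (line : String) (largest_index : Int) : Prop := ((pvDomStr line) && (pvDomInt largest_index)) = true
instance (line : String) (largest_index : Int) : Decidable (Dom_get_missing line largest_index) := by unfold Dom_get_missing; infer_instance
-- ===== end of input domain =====

-- B replaces A's range scan with per-index membership tests by an insertion-ordered key table:
-- build dict.fromkeys over the whole range once, pop each key present in the line, return the
-- surviving keys (equivalence of the RETURN value; neither version mutates its arguments).


-- ===== PORT A =====
def get_missing (line : String) (largest_index : Int) : List String :=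
  let attribute_list : List String := []
  let zero_list : List String := []
  let s := (PySem.Str.split? line " ").getD []
  let attribute_list := (PySem.List.slice s (some 1) none).foldl
    (fun acc entry =>
      let sp := (PySem.Str.split? entry ":").getD []
      -- sp[0]: split always returns a nonempty list, so index 0 is exact
      acc ++ [PySem.List.pyGetD sp 0 ""]) attribute_list
  let zero_list := (PySem.List.pyRange 1 (largest_index + 1) 1).foldl
    (fun acc i => if PySem.Int.toStr i ∉ attribute_list then acc ++ [PySem.Int.toStr i] else acc)
    zero_list
  zero_list

-- ===== PORT B =====
def get_missing_alt (line : String) (largest_index : Int) : List String :=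
  -- missing = dict.fromkeys(str(i) for i in range(1, largest_index + 1))
  let missing : PySem.Dict String Unit :=
    (PySem.List.pyRange 1 (largest_index + 1) 1).foldl
      (fun d i => d.insert (PySem.Int.toStr i) ()) PySem.Dict.empty
  -- for entry in line.split(' ')[1:]: missing.pop(entry.split(':')[0], None)
  let missing := (PySem.List.slice ((PySem.Str.split? line " ").getD []) (some 1) none).foldl
      (fun d entry =>
        -- pop with a default never raises; only the removal is observable
        d.erase (PySem.List.pyGetD ((PySem.Str.split? entry ":").getD []) 0 "")) missing
  -- return list(missing)
  missing.keys

-- ===== PRECONDITION & SPEC =====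
def Spec_get_missing (line : String) (largest_index : Int) (out : List String) : Prop := out = get_missing_alt line largest_index
instance (line : String) (largest_index : Int) (out : List String) : Decidable (Spec_get_missing line largest_index out) := by unfold Spec_get_missing; infer_instance

-- ===== CLAIM (what is proved, stated in full; the proofs are below) =====
def Claim_equal_get_missing : Prop := ∀ (line : String) (largest_index : Int), Dom_get_missing line largest_index → Spec_get_missing line largest_index (get_missing line largest_index)

-- ===== LEMMAS AND PROOFS =====

-- decimal digits of n, most significant first (specification of Nat.toDigits 10)
def pvDigs (n : Nat) : List Char :=
  if _h : n < 10 then [Nat.digitChar n]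
  else pvDigs (n / 10) ++ [Nat.digitChar (n % 10)]
decreasing_by exact Nat.div_lt_self (by omega) (by omega)

def pvParse (cs : List Char) : Nat := cs.foldl (fun a c => a * 10 + (c.toNat - 48)) 0

lemma pvToDigitsCore_eq (fuel : Nat) : ∀ (n : Nat) (ds : List Char), n < fuel →
    Nat.toDigitsCore 10 fuel n ds = pvDigs n ++ ds := by
  induction fuel with
  | zero => intro n ds h; exact absurd h (by omega)

  | succ fuel ih =>
    intro n ds _h
    rw [Nat.toDigitsCore]
    by_cases h10 : n < 10
    · have : n / 10 = 0 := Nat.div_eq_of_lt h10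
      simp only [this, if_true]
      rw [pvDigs, dif_pos h10, Nat.mod_eq_of_lt h10]
      simp
    · have hdlt : n / 10 < n := Nat.div_lt_self (by omega) (by omega)
      have hne : ¬ n / 10 = 0 := by
        have : 1 ≤ n / 10 := (Nat.one_le_div_iff (by omega)).mpr (by omega)
        omega
      simp only [hne, if_false]
      rw [ih (n / 10) _ (by omega)]
      conv_rhs => rw [pvDigs]
      rw [dif_neg h10]
      simp

lemma pvParse_step (cs : List Char) (c : Char) :
    pvParse (cs ++ [c]) = pvParse cs * 10 + (c.toNat - 48) := by
  simp [pvParse]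

lemma pvDigitChar_val (k : Nat) (h : k < 10) : (Nat.digitChar k).toNat - 48 = k := by
  interval_cases k <;> rfl

lemma pvParse_pvDigs (n : Nat) : pvParse (pvDigs n) = n := by
  induction n using Nat.strong_induction_on with
  | _ n ih =>
    by_cases h : n < 10
    · rw [pvDigs, dif_pos h]
      simpa [pvParse] using pvDigitChar_val n h
    · rw [pvDigs, dif_neg h, pvParse_step,
        ih (n / 10) (Nat.div_lt_self (by omega) (by omega)),
        pvDigitChar_val (n % 10) (Nat.mod_lt _ (by omega))]
      omega

lemma pvToDigits_inj (a b : Nat) (h : Nat.toDigits 10 a = Nat.toDigits 10 b) : a = b := by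
  have ha : Nat.toDigits 10 a = pvDigs a := by
    rw [Nat.toDigits, pvToDigitsCore_eq (a + 1) a [] (by omega)]; simp
  have hb : Nat.toDigits 10 b = pvDigs b := by
    rw [Nat.toDigits, pvToDigitsCore_eq (b + 1) b [] (by omega)]; simp
  rw [ha, hb] at h
  have := congrArg pvParse h
  rwa [pvParse_pvDigs, pvParse_pvDigs] at this

lemma pvToStr_inj_pos (i j : Int) (hi : 0 < i) (hj : 0 < j)
    (h : PySem.Int.toStr i = PySem.Int.toStr j) : i = j := by
  have h' := congrArg String.toList h
  rw [PySem.Int.toList_toStr, PySem.Int.toList_toStr] at h'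
  simp only [PySem.Int.toChars, if_neg (by omega : ¬ i < 0), if_neg (by omega : ¬ j < 0)] at h'
  have := pvToDigits_inj _ _ h'
  omega

lemma pvRange_map_toStr_nodup (b : Int) :
    ((PySem.List.pyRange 1 b 1).map PySem.Int.toStr).Nodup := by
  refine List.Nodup.map_on ?_ (PySem.List.nodup_pyRange_one 1 b)
  intro x hx y hy hxy
  have hx1 := (PySem.List.mem_pyRange_one.mp hx).1
  have hy1 := (PySem.List.mem_pyRange_one.mp hy).1
  exact pvToStr_inj_pos x y (by omega) (by omega) hxy

-- a loop of erases is one filter over the items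
lemma pvItems_foldl_erase {β : Type} (g : β → String) :
    ∀ (es : List β) (d : PySem.Dict String Unit),
    (es.foldl (fun d e => d.erase (g e)) d).items
      = d.items.filter (fun p => !(es.map g).contains p.1) := by
  intro es
  induction es with
  | nil => intro d; simp
  | cons e es ih =>
    intro d
    rw [List.foldl_cons, ih]
    show (d.erase (g e)).items.filter _ = _
    simp only [PySem.Dict.erase, List.filter_filter, List.map_cons]
    apply List.filter_congr
    intro p _
    simp only [List.contains_cons]
    cases hpe : p.1 == g e
    · simp
    · simp [eq_of_beq hpe]

-- ===== VERDICT (by name: the statement is the Claim_ definition above) =====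
theorem get_missing_spec : Claim_equal_get_missing := by
  intro line largest_index _
  unfold Spec_get_missing
  simp only [get_missing, get_missing_alt]
  simp only [PySem.List.foldl_append_singleton_eq_map, List.nil_append]
  set attrs := (PySem.List.slice ((PySem.Str.split? line " ").getD []) (some 1) none).map
      (fun e => PySem.List.pyGetD ((PySem.Str.split? e ":").getD []) 0 "") with hattrs
  rw [PySem.List.foldl_append_ite]
  simp only [List.nil_append, PySem.Dict.keys]
  rw [pvItems_foldl_erase
    (fun entry => PySem.List.pyGetD ((PySem.Str.split? entry ":").getD []) 0 "")]
  rw [show (fun (d : PySem.Dict String Unit) (i : Int) => d.insert (PySem.Int.toStr i) ())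
      = (fun d i => d.insert (PySem.Int.toStr i) ((fun _ => ()) i)) from rfl]
  rw [PySem.Dict.items_foldl_insert_fresh (PySem.List.pyRange 1 (largest_index + 1) 1)
      PySem.Int.toStr (fun _ => ()) PySem.Dict.empty
      (fun a _ => by simp)
      (pvRange_map_toStr_nodup (largest_index + 1))]
  simp only [← hattrs, PySem.Dict.empty, List.nil_append, List.filter_map, List.map_map]
  have hfil : (fun x : Int => decide (PySem.Int.toStr x ∉ attrs))
      = ((fun p : String × Unit => !attrs.contains p.1) ∘ fun a : Int => (PySem.Int.toStr a, ())) := by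
    funext x
    by_cases hm : PySem.Int.toStr x ∈ attrs <;> simp [hm]
  rw [← hfil]
  rfl
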